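-- pv_equiv track=rewrite | github.com/AlqanNazra/Komputer-grafik | Day 3/Pra/[KG2024_2ABC_XYZ_D3_2023]_Modul3/[KG2024_2C_068_D3_2023]_Modul3/2C_068_task04/primitif/line.py | line_high
-- ===== SOURCE A (Python) =====
-- def line_high(xa, ya, xb, yb, dash_length=0):
--     res = [[xa, ya]]
--
--     dx = xb - xa
--     dy = yb - ya
--     xi = 1
--     if dx < 0:
--         xi = -1
--         dx = -dx
--     p = 2 * dx - dy
--     twodx = 2 * dx
--     twodxdy = 2 * (dx - dy)
--     x = xa
--
--     draw = True
--     count = 0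
--
--     for y in range(ya, yb):
--         if draw:
--             res.append([x, y])
--         count += 1
--         if count == dash_length:
--             draw = not draw
--             count = 0
--         if p > 0:
--             x += xi
--             p += twodxdy
--         else:
--             p += twodx
--
--     return res
-- ===== SOURCE B (Python) =====
-- def line_high(xa, ya, xb, yb, dash_length=0):
--     dx = xb - xa
--     dy = yb - ya
--     xi = -1 if dx < 0 else 1
--     dx = abs(dx)
--     pts = []
--     p = 2 * dx - dy
--     x = xa
--     for k in range(dy):
--         pts.append([x, ya + k])
--         if p > 0:
--             x += xi
--             p += 2 * (dx - dy)
--         else: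
--             p += 2 * dx
--     if dash_length > 0:
--         pts = [pt for k, pt in enumerate(pts) if (k // dash_length) % 2 == 0]
--     return [[xa, ya]] + pts
-- ===== Notes on version B (the rewrite author's own statement) =====
-- stated objective: simpler
-- what changed: B splits A's single stateful loop into point generation (a plain Bresenham pass with no draw/count state) followed by an index-arithmetic dash filter ((k // dash_length) % 2 == 0) over the enumerated points, replacing A's mutable draw/count toggle.
import Mathlib
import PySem

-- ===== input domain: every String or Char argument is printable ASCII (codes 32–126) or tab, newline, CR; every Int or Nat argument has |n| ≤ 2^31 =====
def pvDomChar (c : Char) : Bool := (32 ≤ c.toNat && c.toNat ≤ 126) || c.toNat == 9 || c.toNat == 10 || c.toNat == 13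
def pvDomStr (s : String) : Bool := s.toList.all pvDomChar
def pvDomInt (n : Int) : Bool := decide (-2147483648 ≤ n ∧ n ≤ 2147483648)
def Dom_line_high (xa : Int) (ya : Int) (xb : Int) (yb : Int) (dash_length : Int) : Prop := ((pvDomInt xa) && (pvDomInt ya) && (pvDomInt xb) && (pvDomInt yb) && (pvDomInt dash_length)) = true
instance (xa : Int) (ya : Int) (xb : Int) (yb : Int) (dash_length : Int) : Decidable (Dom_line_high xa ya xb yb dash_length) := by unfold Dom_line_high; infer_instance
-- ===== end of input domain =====

-- B separates point generation from dash masking: one plain Bresenham pass producing all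
-- candidate points, then an index-based filter ((k // dash_length) % 2 == 0) replacing A's
-- draw/count toggle state; objective: simpler decomposition, same cost.

-- ===== PORT A =====
-- loop body of A's for-loop, as a named stepper over the state (res, p, x, draw, count)
def stepA (dash_length twodxdy twodx xi : Int)
    (s : List (List Int) × Int × Int × Bool × Int) (y : Int) :
    List (List Int) × Int × Int × Bool × Int :=
  match s with
  | (res, p, x, draw, count) =>
    let res := if draw then res ++ [[x, y]] else res
    let count := count + 1
    let (draw, count) := if count = dash_length then (!draw, (0 : Int)) else (draw, count)
    if p > 0 then (res, p + twodxdy, x + xi, draw, count)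
    else (res, p + twodx, x, draw, count)

def line_high (xa : Int) (ya : Int) (xb : Int) (yb : Int) (dash_length : Int) : List (List Int) :=
  let res : List (List Int) := [[xa, ya]]
  let dx := xb - xa
  let dy := yb - ya
  let xi : Int := if dx < 0 then -1 else 1
  let dx := if dx < 0 then -dx else dx
  let p := 2 * dx - dy
  let twodx := 2 * dx
  let twodxdy := 2 * (dx - dy)
  let final := (PySem.List.pyRange ya yb 1).foldl
    (stepA dash_length twodxdy twodx xi) (res, p, xa, true, (0 : Int))
  final.1

-- ===== PORT B =====
-- loop body of B's generation loop, over the state (pts, p, x)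
def stepB (ya xi dx dy : Int) (s : List (List Int) × Int × Int) (k : Int) :
    List (List Int) × Int × Int :=
  match s with
  | (pts, p, x) =>
    (pts ++ [[x, ya + k]],
     if p > 0 then p + 2 * (dx - dy) else p + 2 * dx,
     if p > 0 then x + xi else x)

def line_high_alt (xa : Int) (ya : Int) (xb : Int) (yb : Int) (dash_length : Int) : List (List Int) :=
  let dx := xb - xa
  let dy := yb - ya
  let xi : Int := if dx < 0 then -1 else 1
  let dx := |dx|
  let gen := (PySem.List.pyRange 0 dy 1).foldl (stepB ya xi dx dy)
    ([], 2 * dx - dy, xa)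
  let pts := gen.1
  let pts := if dash_length > 0 then
      (PySem.List.enumerate pts 0).filterMap
        (fun kp => if PySem.Int.mod (PySem.Int.floordiv kp.1 dash_length) 2 = 0 then some kp.2 else none)
    else pts
  [[xa, ya]] ++ pts

-- ===== PRECONDITION & SPEC =====
def Spec_line_high (xa : Int) (ya : Int) (xb : Int) (yb : Int) (dash_length : Int) (out : List (List Int)) : Prop := out = line_high_alt xa ya xb yb dash_length
instance (xa : Int) (ya : Int) (xb : Int) (yb : Int) (dash_length : Int) (out : List (List Int)) : Decidable (Spec_line_high xa ya xb yb dash_length out) := by unfold Spec_line_high; infer_instance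

-- ===== CLAIM (what is proved, stated in full; the proofs are below) =====
def Claim_equal_line_high : Prop := ∀ (xa : Int) (ya : Int) (xb : Int) (yb : Int) (dash_length : Int), Dom_line_high xa ya xb yb dash_length → Spec_line_high xa ya xb yb dash_length (line_high xa ya xb yb dash_length)

-- ===== LEMMAS AND PROOFS =====

-- reference Bresenham point stream: n points starting at (x, y)
def bres (n : Nat) (x p y xi tdxdy tdx : Int) : List (List Int) :=
  match n with
  | 0 => []
  | n + 1 => [x, y] :: bres n (if p > 0 then x + xi else x)
      (if p > 0 then p + tdxdy else p + tdx) (y + 1) xi tdxdy tdx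

-- A's dash mask, as a recursion over the point stream
def maskA (L c : Int) (draw : Bool) : List (List Int) → List (List Int)
  | [] => []
  | pt :: ps =>
    (if draw then [pt] else []) ++
    (if c + 1 = L then maskA L 0 (!draw) ps else maskA L (c + 1) draw ps)

-- B's dash mask, as a recursion over the point stream
def maskB (L k : Int) : List (List Int) → List (List Int)
  | [] => []
  | pt :: ps =>
    (if PySem.Int.mod (PySem.Int.floordiv k L) 2 = 0 then [pt] else []) ++ maskB L (k + 1) ps

theorem foldA_eq (L tdxdy tdx xi : Int) (n : Nat) :
    ∀ (y : Int) (res : List (List Int)) (p x : Int) (draw : Bool) (c : Int),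
    ((PySem.List.pyRange y (y + n) 1).foldl (stepA L tdxdy tdx xi) (res, p, x, draw, c)).1
      = res ++ maskA L c draw (bres n x p y xi tdxdy tdx) := by
  induction n with
  | zero =>
    intro y res p x draw c
    rw [PySem.List.pyRange_one_eq_nil (by omega : y + ((0:Nat):Int) ≤ y)]
    simp [bres, maskA]
  | succ n ih =>
    intro y res p x draw c
    rw [PySem.List.pyRange_one_cons (by push_cast; omega : y < y + ((n:Nat)+1:Nat))]
    have hy : y + ((n + 1 : Nat) : Int) = (y + 1) + (n : Nat) := by push_cast; omega
    rw [List.foldl_cons, hy]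
    show ((PySem.List.pyRange (y+1) ((y+1) + (n:Nat)) 1).foldl (stepA L tdxdy tdx xi)
      (stepA L tdxdy tdx xi (res, p, x, draw, c) y)).1 = _
    simp only [stepA, bres, maskA]
    split_ifs <;> simp [ih, List.append_assoc]

theorem foldB_eq (ya xi dx dy : Int) (n : Nat) :
    ∀ (k : Int) (pts : List (List Int)) (p x : Int),
    ((PySem.List.pyRange k (k + n) 1).foldl (stepB ya xi dx dy) (pts, p, x)).1
      = pts ++ bres n x p (ya + k) xi (2 * (dx - dy)) (2 * dx) := by
  induction n with
  | zero =>
    intro k pts p x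
    rw [PySem.List.pyRange_one_eq_nil (by omega : k + ((0:Nat):Int) ≤ k)]
    simp [bres]
  | succ n ih =>
    intro k pts p x
    rw [PySem.List.pyRange_one_cons (by push_cast; omega : k < k + ((n:Nat)+1:Nat))]
    have hk : k + ((n + 1 : Nat) : Int) = (k + 1) + (n : Nat) := by push_cast; omega
    rw [List.foldl_cons, hk]
    show ((PySem.List.pyRange (k+1) ((k+1) + (n:Nat)) 1).foldl (stepB ya xi dx dy)
      (stepB ya xi dx dy (pts, p, x) k)).1 = _
    simp only [stepB, bres]
    rw [ih]
    have : ya + k + 1 = ya + (k + 1) := by ring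
    simp [this, List.append_assoc]

theorem maskA_id (L : Int) (hL : L ≤ 0) :
    ∀ (ps : List (List Int)) (c : Int), 0 ≤ c → maskA L c true ps = ps := by
  intro ps
  induction ps with
  | nil => intro c _; simp [maskA]
  | cons pt ps ih =>
    intro c hc
    simp only [maskA, if_pos]
    rw [if_neg (by omega), ih (c + 1) (by omega)]
    simp

theorem enumFilter_eq (L : Int) :
    ∀ (ps : List (List Int)) (s : Int),
    (PySem.List.enumerate ps s).filterMap
      (fun kp => if PySem.Int.mod (PySem.Int.floordiv kp.1 L) 2 = 0 then some kp.2 else none)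
        = maskB L s ps := by
  intro ps
  induction ps with
  | nil => intro s; simp [PySem.List.enumerate_nil, maskB]
  | cons pt ps ih =>
    intro s
    simp only [PySem.List.enumerate_cons, List.filterMap_cons]
    rw [ih (s + 1), maskB]
    split_ifs with h <;> simp

theorem maskA_eq_maskB (L : Int) (hL : 0 < L) :
    ∀ (ps : List (List Int)) (k : Int), 0 ≤ k →
    maskA L (k % L) (decide ((k / L) % 2 = 0)) ps = maskB L k ps := by
  intro ps
  induction ps with
  | nil => intro k _; simp [maskA, maskB]
  | cons pt ps ih =>
    intro k hk
    have hmod := PySem.Int.mod_eq_emod_of_pos (a := k) hL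
    have hdiv := PySem.Int.floordiv_eq_ediv_of_pos (a := k) hL
    have hmod2 := PySem.Int.mod_eq_emod_of_pos (a := PySem.Int.floordiv k L) (by omega : (0:Int) < 2)
    have hr0 : 0 ≤ k % L := Int.emod_nonneg k (by omega)
    have hrL : k % L < L := Int.emod_lt_of_pos k hL
    have hsplit : k + 1 = (k % L + 1) + L * (k / L) := by
      have := Int.mul_ediv_add_emod k L; omega
    have IH := ih (k + 1) (by omega)
    simp only [maskA, maskB]
    rw [hmod2, hdiv]
    by_cases htog : k % L + 1 = L
    · -- block boundary: (k+1) % L = 0, (k+1) / L = k/L + 1, parity flips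
      have he : (k + 1) % L = 0 := by
        rw [hsplit, Int.add_mul_emod_self_left, htog, Int.emod_self]
      have hd : (k + 1) / L = k / L + 1 := by
        rw [hsplit, Int.add_mul_ediv_left _ _ (by omega : L ≠ 0), htog,
          Int.ediv_self (by omega : L ≠ 0)]; ring
      rw [he, hd] at IH
      have hpar : (decide ((k / L + 1) % 2 = 0)) = !decide ((k / L) % 2 = 0) := by
        rcases Int.emod_two_eq (k / L) with h | h <;>
          simp [h] <;> omega
      rw [hpar] at IH
      rw [if_pos htog, ← IH]
      simp
    · -- inside a block: (k+1) % L = k % L + 1, (k+1) / L = k / L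
      have he : (k + 1) % L = k % L + 1 := by
        rw [hsplit, Int.add_mul_emod_self_left, Int.emod_eq_of_lt (by omega) (by omega)]
      have hd : (k + 1) / L = k / L := by
        rw [hsplit, Int.add_mul_ediv_left _ _ (by omega : L ≠ 0),
          Int.ediv_eq_zero_of_lt (by omega) (by omega)]; ring
      rw [he, hd] at IH
      rw [if_neg htog, ← IH]
      simp

-- ===== VERDICT (by name: the statement is the Claim_ definition above) =====
theorem line_high_spec : Claim_equal_line_high := by
  intro xa ya xb yb L _
  unfold Spec_line_high line_high line_high_alt
  have habs : (if xb - xa < 0 then -(xb - xa) else xb - xa) = |xb - xa| := by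
    split_ifs with h
    · exact (abs_of_neg h).symm
    · exact (abs_of_nonneg (by omega)).symm
  simp only [habs]
  set dx := |xb - xa| with hdx
  set xi : Int := if xb - xa < 0 then -1 else 1 with hxi
  by_cases hdy : yb ≤ ya
  · -- empty range on both sides
    rw [PySem.List.pyRange_one_eq_nil hdy, PySem.List.pyRange_one_eq_nil (by omega : yb - ya ≤ 0)]
    simp [PySem.List.enumerate_nil]
  · rw [not_le] at hdy
    obtain ⟨n, rfl⟩ : ∃ n : Nat, yb = ya + n := ⟨(yb - ya).toNat, by omega⟩
    simp only [add_sub_cancel_left]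
    rw [foldA_eq,
      show PySem.List.pyRange 0 (n : Int) 1 = PySem.List.pyRange 0 (0 + (n : Int)) 1 by norm_num,
      foldB_eq]
    simp only [List.nil_append, add_zero]
    by_cases hLpos : 0 < L
    · rw [if_pos hLpos, enumFilter_eq]
      have h0 := maskA_eq_maskB L hLpos (bres n xa (2 * dx - (n : Int)) ya xi
        (2 * (dx - (n : Int))) (2 * dx)) 0 le_rfl
      simp only [Int.zero_emod, Int.zero_ediv, decide_true] at h0
      rw [← h0]
    · rw [if_neg hLpos, maskA_id L (by omega) _ 0 le_rfl]
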